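-- pv_equiv track=rewrite | github.com/Marcsus26/APP_ISN3 | test_a_lancer_v01_4_A_COMPLETER_DANS_RENDU.py | sous_graphe_parents
-- ===== SOURCE A (Python) =====
-- def sous_graphe_parents(s_init, adj):
--     '''
--     s_init : sommet initial
--     adj : dico associant la liste des suivants à tout sommet ayant au moins un suivant
--     type des sommets quelconques pourvu qu'il y ait cohérence entre éléments de la liste et du dico.
--     retourne un dico représentant le sous-graphe des parents du graphe initial
--     '''
--     parents = {s_init : []}
--     a_traiter = [s_init] #liste des sommets à traiter
--     while a_traiter != [] :
--         s = a_traiter.pop(0) #on retire le premier élément de la liste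
--         for suivant in adj.get(s, []) : #on récupère la liste des suivants de s, [] si s n'a pas de suivant
--             if suivant not in parents :
--                 parents[suivant] = [s]
--                 a_traiter.append(suivant)
--             else :
--                 parents[suivant].append(s)
--     parents[s_init] = [] #on enlève le parent de s_init
--     return parents
-- ===== SOURCE B (Python) =====
-- def sous_graphe_parents(s_init, adj):
--     # Two-pass: plain reachability BFS first (no parent bookkeeping), then
--     # build the parent lists in a second pass over the BFS processing order.
--     visited = {s_init}
--     queue = [s_init]
--     order = []
--     while queue:
--         s = queue.pop(0)
--         order.append(s)
--         for nxt in adj.get(s, []):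
--             if nxt not in visited:
--                 visited.add(nxt)
--                 queue.append(nxt)
--     parents = {s_init: []}
--     for s in order:
--         for nxt in adj.get(s, []):
--             if nxt in parents:
--                 parents[nxt].append(s)
--             else:
--                 parents[nxt] = [s]
--     parents[s_init] = []
--     return parents
-- ===== Notes on version B (the rewrite author's own statement) =====
-- stated objective: alternative
-- what changed: A's single fused BFS loop that updates the parents dict and the work queue together is split into a plain reachability BFS that only records the processing order, plus a separate second pass over that order that builds the parent lists.
import Mathlib
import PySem

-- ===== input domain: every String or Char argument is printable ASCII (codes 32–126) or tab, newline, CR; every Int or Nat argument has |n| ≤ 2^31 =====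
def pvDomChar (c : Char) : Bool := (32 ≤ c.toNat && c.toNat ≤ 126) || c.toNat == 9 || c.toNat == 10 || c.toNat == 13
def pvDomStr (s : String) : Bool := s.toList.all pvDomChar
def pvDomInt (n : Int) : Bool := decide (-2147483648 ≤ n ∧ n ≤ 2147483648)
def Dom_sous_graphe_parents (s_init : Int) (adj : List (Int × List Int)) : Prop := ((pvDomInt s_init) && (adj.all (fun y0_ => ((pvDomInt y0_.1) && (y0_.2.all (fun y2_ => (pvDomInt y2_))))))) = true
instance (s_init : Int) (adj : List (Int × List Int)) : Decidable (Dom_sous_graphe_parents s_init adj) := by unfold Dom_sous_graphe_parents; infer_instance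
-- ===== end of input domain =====

-- B replaces A's single fused BFS loop (parents dict + work queue updated together) by a
-- plain reachability BFS that only records the processing order, followed by a separate
-- pass over that order that builds the parent lists (objective: alternative decomposition).

-- ===== PORT A =====
-- adj.get(s, []) on the dict adj
def pvAdjGet (adj : List (Int × List Int)) (s : Int) : List Int :=
  (PySem.Dict.mk adj).getD s []

-- body of A's inner 'for suivant in adj.get(s, [])' loop (state = (parents, a_traiter))
def pvStepA (s : Int) (st : PySem.Dict Int (List Int) × List Int) (suivant : Int) :
    PySem.Dict Int (List Int) × List Int :=
  if st.1.contains suivant = false then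
    (st.1.insert suivant [s], st.2 ++ [suivant])
  else
    (st.1.modify suivant [] (fun l => l ++ [s]), st.2)

-- A's 'while a_traiter != []' loop; fuel is only a totality guard (pops ≤ 1 + total
-- number of successor entries, so the fuel passed below never runs out)
def pvLoopA (adj : List (Int × List Int)) :
    Nat → PySem.Dict Int (List Int) → List Int → PySem.Dict Int (List Int)
  | 0, parents, _ => parents
  | _ + 1, parents, [] => parents
  | fuel + 1, parents, s :: rest =>
      let st := (pvAdjGet adj s).foldl (pvStepA s) (parents, rest)
      pvLoopA adj fuel st.1 st.2

def sous_graphe_parents (s_init : Int) (adj : List (Int × List Int)) : List (Int × List Int) :=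
  let fuel := 1 + adj.foldl (fun a p => a + p.2.length) 0
  let parents := pvLoopA adj fuel (PySem.Dict.mk [(s_init, [])]) [s_init]
  (parents.insert s_init []).items

-- ===== PORT B =====
-- body of B's phase-1 inner loop (state = (visited, queue)); no parent bookkeeping
def pvStepB1 (st : PySem.Set Int × List Int) (nxt : Int) : PySem.Set Int × List Int :=
  if st.1.contains nxt = false then
    (st.1.add nxt, st.2 ++ [nxt])
  else
    st

-- B's phase 1: reachability BFS returning the pop (processing) order; same fuel guard
def pvBfsOrder (adj : List (Int × List Int)) :
    Nat → PySem.Set Int → List Int → List Int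
  | 0, _, _ => []
  | _ + 1, _, [] => []
  | fuel + 1, visited, s :: rest =>
      let st := (pvAdjGet adj s).foldl pvStepB1 (visited, rest)
      s :: pvBfsOrder adj fuel st.1 st.2

-- body of B's phase-2 inner loop: record s as a parent of nxt
def pvStepB2 (s : Int) (p : PySem.Dict Int (List Int)) (nxt : Int) : PySem.Dict Int (List Int) :=
  if p.contains nxt then p.modify nxt [] (fun l => l ++ [s])
  else p.insert nxt [s]

-- body of B's phase-2 outer loop over the BFS order
def pvNodeB2 (adj : List (Int × List Int)) (p : PySem.Dict Int (List Int)) (s : Int) :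
    PySem.Dict Int (List Int) :=
  (pvAdjGet adj s).foldl (pvStepB2 s) p

def sous_graphe_parents_alt (s_init : Int) (adj : List (Int × List Int)) : List (Int × List Int) :=
  let fuel := 1 + adj.foldl (fun a p => a + p.2.length) 0
  let order := pvBfsOrder adj fuel (PySem.Set.add PySem.Set.empty s_init) [s_init]
  let parents := order.foldl (pvNodeB2 adj) (PySem.Dict.mk [(s_init, [])])
  (parents.insert s_init []).items

-- ===== PRECONDITION & SPEC =====
def Spec_sous_graphe_parents (s_init : Int) (adj : List (Int × List Int)) (out : List (Int × List Int)) : Prop := out = sous_graphe_parents_alt s_init adj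
instance (s_init : Int) (adj : List (Int × List Int)) (out : List (Int × List Int)) : Decidable (Spec_sous_graphe_parents s_init adj out) := by unfold Spec_sous_graphe_parents; infer_instance

-- ===== CLAIM (what is proved, stated in full; the proofs are below) =====
def Claim_equal_sous_graphe_parents : Prop := ∀ (s_init : Int) (adj : List (Int × List Int)), Dom_sous_graphe_parents s_init adj → Spec_sous_graphe_parents s_init adj (sous_graphe_parents s_init adj)

-- ===== LEMMAS AND PROOFS =====

-- invariant tying A's parents-dict key set to B's visited set
def pvInv (p : PySem.Dict Int (List Int)) (v : PySem.Set Int) : Prop :=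
  ∀ x : Int, p.contains x = true ↔ x ∈ v

-- one inner loop in lockstep: A's fused step = (B's phase-2 step, B's phase-1 step)
theorem pvInner (s : Int) (l : List Int) :
    ∀ (p : PySem.Dict Int (List Int)) (q : List Int) (v : PySem.Set Int), pvInv p v →
      (l.foldl (pvStepA s) (p, q)).1 = l.foldl (pvStepB2 s) p ∧
      (l.foldl (pvStepA s) (p, q)).2 = (l.foldl pvStepB1 (v, q)).2 ∧
      pvInv (l.foldl (pvStepA s) (p, q)).1 (l.foldl pvStepB1 (v, q)).1 := by
  induction l with
  | nil => intro p q v h; exact ⟨rfl, rfl, h⟩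
  | cons x l ih =>
    intro p q v h
    by_cases hc : p.contains x = true
    · have hv : x ∈ v := (h x).mp hc
      have hA : pvStepA s (p, q) x = (p.modify x [] (fun l => l ++ [s]), q) := by
        simp [pvStepA, hc]
      have hB1 : pvStepB1 (v, q) x = (v, q) := by
        simp [pvStepB1, hv]
      have hB2 : pvStepB2 s p x = p.modify x [] (fun l => l ++ [s]) := by
        simp [pvStepB2, hc]
      have h' : pvInv (p.modify x [] (fun l => l ++ [s])) v := by
        intro y
        rw [PySem.Dict.contains_modify]
        constructor
        · intro hy
          rcases Bool.or_eq_true_iff.mp hy with hy | hy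
          · exact (beq_iff_eq.mp hy) ▸ hv
          · exact (h y).mp hy
        · intro hy
          exact Bool.or_eq_true_iff.mpr (Or.inr ((h y).mpr hy))
      simp only [List.foldl_cons, hA, hB1, hB2]
      exact ih _ _ _ h'
    · have hc' : p.contains x = false := by simpa using hc
      have hv : x ∉ v := fun hx => hc ((h x).mpr hx)
      have hA : pvStepA s (p, q) x = (p.insert x [s], q ++ [x]) := by
        simp [pvStepA, hc']
      have hB1 : pvStepB1 (v, q) x = (v.add x, q ++ [x]) := by
        simp [pvStepB1, hv]
      have hB2 : pvStepB2 s p x = p.insert x [s] := by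
        simp [pvStepB2, hc']
      have h' : pvInv (p.insert x [s]) (v.add x) := by
        intro y
        rw [PySem.Dict.contains_insert, PySem.Set.mem_add]
        constructor
        · intro hy
          rcases Bool.or_eq_true_iff.mp hy with hy | hy
          · exact Or.inr (beq_iff_eq.mp hy)
          · exact Or.inl ((h y).mp hy)
        · intro hy
          rcases hy with hy | hy
          · exact Bool.or_eq_true_iff.mpr (Or.inr ((h y).mpr hy))
          · exact Bool.or_eq_true_iff.mpr (Or.inl (beq_iff_eq.mpr hy))
      simp only [List.foldl_cons, hA, hB1, hB2]
      exact ih _ _ _ h'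

-- the whole loop in lockstep: A's fused BFS = phase 2 folded over phase 1's order
theorem pvLockstep (adj : List (Int × List Int)) :
    ∀ (fuel : Nat) (p : PySem.Dict Int (List Int)) (q : List Int) (v : PySem.Set Int),
      pvInv p v →
      pvLoopA adj fuel p q = (pvBfsOrder adj fuel v q).foldl (pvNodeB2 adj) p := by
  intro fuel
  induction fuel with
  | zero => intro p q v _; rfl
  | succ fuel ih =>
    intro p q v h
    cases q with
    | nil => rfl
    | cons s rest =>
      obtain ⟨h1, h2, h3⟩ := pvInner s (pvAdjGet adj s) p rest v h
      show pvLoopA adj fuel ((pvAdjGet adj s).foldl (pvStepA s) (p, rest)).1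
             ((pvAdjGet adj s).foldl (pvStepA s) (p, rest)).2 =
           List.foldl (pvNodeB2 adj) p (s ::
             pvBfsOrder adj fuel ((pvAdjGet adj s).foldl pvStepB1 (v, rest)).1
               ((pvAdjGet adj s).foldl pvStepB1 (v, rest)).2)
      rw [h2, ih _ _ _ h3, h1, List.foldl_cons]
      rfl

theorem pvInvInit (s_init : Int) :
    pvInv (PySem.Dict.mk [(s_init, [])]) (PySem.Set.add PySem.Set.empty s_init) := by
  intro x
  have hadd : PySem.Set.add PySem.Set.empty s_init = [s_init] := rfl
  rw [PySem.Dict.contains_mk, hadd]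
  simp only [List.any_cons, List.any_nil, Bool.or_false, beq_iff_eq, List.mem_singleton]
  exact eq_comm

-- ===== VERDICT (by name: the statement is the Claim_ definition above) =====
theorem sous_graphe_parents_spec : Claim_equal_sous_graphe_parents := by
  intro s_init adj _
  unfold Spec_sous_graphe_parents
  show ((pvLoopA adj (1 + adj.foldl (fun a p => a + p.2.length) 0)
            (PySem.Dict.mk [(s_init, [])]) [s_init]).insert s_init []).items =
       ((((pvBfsOrder adj (1 + adj.foldl (fun a p => a + p.2.length) 0)
            (PySem.Set.add PySem.Set.empty s_init) [s_init]).foldl (pvNodeB2 adj)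
            (PySem.Dict.mk [(s_init, [])])).insert s_init [])).items
  rw [pvLockstep adj _ _ _ _ (pvInvInit s_init)]
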